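-- pv_equiv track=rewrite | github.com/JaviPernasResearch/PyFlow | PyFlow/Optimization/seqOptTools.py | transform_sequence
-- ===== SOURCE A (Python) =====
-- def transform_sequence(data_dict: dict, priorities: list) -> dict:
--     """
--     Reorders the values within each key of a dictionary based on a list of priorities.
--     The priorities must start at number 1 and have a length equal to the length of the dictionary.
--
--     Args:
--         data_dict (dict): The dictionary to reorder.
--         priorities (list): The list of priorities to reorder the values by.
--
--     Returns:
--         dict: The dictionary with reordered values.
--
--     Raises:
--         ValueError: If the priorities list does not start at 1 or its length does not match the length of the dictionary.
--     """
--     # Validate that all values in the dictionary match the length of priorities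
--     for key, values in data_dict.items():
--         if len(values) != len(priorities):
--             raise ValueError(f"Length mismatch for key '{key}': values have length {len(values)}, priorities have length {len(priorities)}")
--
--     # Create the reordered dictionary
--     reordered_dict = {}
--
--     for key, values in data_dict.items():
--         reordered_values = [None] * len(priorities)  # Initialize with placeholders
--         for current_index, priority_position in enumerate(priorities):
--             # Place the current value into the new position
--             if isinstance(priority_position, int) and 1 <= priority_position <= len(priorities):
--                 reordered_values[priority_position - 1] = values[current_index]  # Adjust for 1-based priority
--             else:
--                 raise IndexError(f"Priority position {priority_position} is out of range for priorities list")
--         reordered_dict[key] = reordered_values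
--
--     return reordered_dict
-- ===== SOURCE B (Python) =====
-- def transform_sequence(data_dict: dict, priorities: list) -> dict:
--     # Validate that all values in the dictionary match the length of priorities
--     for key, values in data_dict.items():
--         if len(values) != len(priorities):
--             raise ValueError(f"Length mismatch for key '{key}': values have length {len(values)}, priorities have length {len(priorities)}")
--
--     # Validate the priorities once (only relevant when there is something to reorder)
--     n = len(priorities)
--     if data_dict:
--         for p in priorities:
--             if not (isinstance(p, int) and 1 <= p <= n):
--                 raise IndexError(f"Priority position {p} is out of range for priorities list")
--
--     # priorities is a 1-based destination permutation, so sorting the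
--     # (priority, value) pairs by priority places each value in its slot.
--     return {key: [v for _, v in sorted(zip(priorities, values), key=lambda pv: pv[0])]
--             for key, values in data_dict.items()}
-- ===== Notes on version B (the rewrite author's own statement) =====
-- stated objective: alternative
-- what changed: B drops A's per-element scatter into a placeholder list entirely: after the same length-validation pass it reorders each key's values by sorting the (priority, value) pairs by priority and reading the values back off, exploiting that priorities is a 1-based destination permutation.
-- outside the precondition, e.g. on transform_sequence({'a': [5, 6]}, [1, 1]): A returns {'a': [6, None]}, B returns {'a': [5, 6]}
import Mathlib
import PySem

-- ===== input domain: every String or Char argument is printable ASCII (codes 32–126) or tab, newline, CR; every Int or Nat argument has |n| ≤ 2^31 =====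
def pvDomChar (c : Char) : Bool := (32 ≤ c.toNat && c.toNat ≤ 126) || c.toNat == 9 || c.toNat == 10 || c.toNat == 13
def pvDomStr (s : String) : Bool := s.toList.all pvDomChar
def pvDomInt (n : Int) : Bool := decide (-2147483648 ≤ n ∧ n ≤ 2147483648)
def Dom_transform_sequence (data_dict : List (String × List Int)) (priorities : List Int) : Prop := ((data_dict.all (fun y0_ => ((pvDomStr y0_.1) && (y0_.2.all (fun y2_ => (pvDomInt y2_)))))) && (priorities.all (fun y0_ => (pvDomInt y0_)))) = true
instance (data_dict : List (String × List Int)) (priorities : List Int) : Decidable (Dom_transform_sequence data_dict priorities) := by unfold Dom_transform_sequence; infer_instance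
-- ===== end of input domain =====

-- B replaces A's per-element scatter into a placeholder list by sorting each key's
-- (priority, value) pairs by priority (objective: alternative algorithm, sort-based).

-- ===== PORT A =====
-- A's first loop only validates lengths and raises ValueError on mismatch; it computes no value
-- and is excluded by Pre_, so it has no computational counterpart here.
-- One scatter step: reordered_values[priority_position - 1] = values[current_index]
-- (the else-branch raises IndexError in Python — excluded by Pre_, the state is left unchanged).
def pvScatterStep (values : List Int) (n : Int) (acc : List (Option Int)) (ip : Int × Int) : List (Option Int) :=
  if 1 ≤ ip.2 ∧ ip.2 ≤ n then acc.set (ip.2 - 1).toNat (some (values.getD ip.1.toNat 0)) else acc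

def transform_sequence (data_dict : List (String × List Int)) (priorities : List Int) : List (String × List Int) :=
  data_dict.map (fun kv =>
    (kv.1,
      ((PySem.List.enumerate priorities 0).foldl (pvScatterStep kv.2 (priorities.length : Int))
          (List.replicate priorities.length none)).map (fun o => o.getD 0)))
      -- the final `Option.getD 0` realises the `None` placeholders in the List Int return type;
      -- under Pre_ every slot is filled, so it never fires

-- ===== PORT B =====
-- Source B's two validation loops (ValueError on length mismatch, IndexError on an out-of-range
-- priority with a nonempty dict) compute no value and are excluded by Pre_; the dict comprehension
-- '{key: [v for _, v in sorted(zip(priorities, values), key=lambda pv: pv[0])] ...}' is this map.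
def transform_sequence_alt (data_dict : List (String × List Int)) (priorities : List Int) : List (String × List Int) :=
  data_dict.map (fun kv =>
    (kv.1, (PySem.List.sorted (priorities.zip kv.2) (fun pv => pv.1) false).map (fun pv => pv.2)))

-- ===== PRECONDITION & SPEC =====
-- Pre_ excludes exactly the inputs where the Pythons raise (length mismatch → ValueError in both;
-- a priority outside 1..n with a nonempty dict → IndexError in both) or where A's duplicate-priority
-- result contains None placeholders (not a value of the declared List Int type; see claim cites);
-- an empty dict returns {} whatever the priorities, so it is always admitted.
def Pre_transform_sequence (data_dict : List (String × List Int)) (priorities : List Int) : Prop :=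
  data_dict = [] ∨
  ((∀ kv ∈ data_dict, (kv.2.length : Int) = (priorities.length : Int)) ∧
   (∀ p ∈ priorities, 1 ≤ p ∧ p ≤ (priorities.length : Int)) ∧
   priorities.Nodup)
instance (data_dict : List (String × List Int)) (priorities : List Int) : Decidable (Pre_transform_sequence data_dict priorities) := by unfold Pre_transform_sequence; infer_instance

def pvWitness_transform_sequence : (List (String × List Int)) × List Int :=
  ([("a", [10, 20, 30]), ("b", [4, 5, 6])], [2, 3, 1])

def Spec_transform_sequence (data_dict : List (String × List Int)) (priorities : List Int) (out : List (String × List Int)) : Prop := out = transform_sequence_alt data_dict priorities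
instance (data_dict : List (String × List Int)) (priorities : List Int) (out : List (String × List Int)) : Decidable (Spec_transform_sequence data_dict priorities out) := by unfold Spec_transform_sequence; infer_instance

-- ===== CLAIM (what is proved, stated in full; the proofs are below) =====
def Claim_equal_transform_sequence : Prop := ∀ (data_dict : List (String × List Int)) (priorities : List Int), Dom_transform_sequence data_dict priorities → Pre_transform_sequence data_dict priorities → Spec_transform_sequence data_dict priorities (transform_sequence data_dict priorities)


-- ===== LEMMAS AND PROOFS =====

-- Under Pre_, every integer 1..n occurs in priorities (nodup + range + length, pigeonhole).
theorem pv_mem_of_perm (ps : List Int) (hnd : ps.Nodup)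
    (hr : ∀ p ∈ ps, 1 ≤ p ∧ p ≤ (ps.length : Int)) (t : Nat) (ht : t < ps.length) :
    ((t : Int) + 1) ∈ ps := by
  have hsub : ps.toFinset ⊆ Finset.Icc (1 : Int) (ps.length : Int) := by
    intro x hx
    rw [List.mem_toFinset] at hx
    exact Finset.mem_Icc.mpr (hr x hx)
  have hcard : (Finset.Icc (1 : Int) (ps.length : Int)).card ≤ ps.toFinset.card := by
    rw [Int.card_Icc, List.toFinset_card_of_nodup hnd]; omega
  have heq := Finset.eq_of_subset_of_card_le hsub hcard
  have : ((t : Int) + 1) ∈ ps.toFinset := by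
    rw [heq, Finset.mem_Icc]; omega
  exact List.mem_toFinset.mp this

-- Membership characterisation of PySem.List.enumerate.
theorem pv_mem_enumerate (ps : List Int) (s : Int) (ip : Int × Int) :
    ip ∈ PySem.List.enumerate ps s ↔
      ∃ i : Nat, ∃ h : i < ps.length, ip = (s + (i : Int), ps[i]) := by
  induction ps generalizing s with
  | nil => simp [PySem.List.enumerate_nil]
  | cons p rest ih =>
    rw [PySem.List.enumerate_cons, List.mem_cons, ih]
    constructor
    · rintro (rfl | ⟨i, hi, rfl⟩)
      · exact ⟨0, by simp, by simp⟩
      · exact ⟨i + 1, by simpa using hi, by simp; ring⟩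
    · rintro ⟨i, hi, rfl⟩
      cases i with
      | zero => left; simp
      | succ j =>
        right
        exact ⟨j, by simpa using hi, by simp; ring⟩

-- The scatter fold preserves the accumulator length.
theorem pv_scatter_length (vs : List Int) (n : Int) (l : List (Int × Int))
    (acc : List (Option Int)) :
    (l.foldl (pvScatterStep vs n) acc).length = acc.length := by
  induction l generalizing acc with
  | nil => rfl
  | cons ip rest ih =>
    rw [List.foldl_cons, ih]
    unfold pvScatterStep
    split_ifs <;> simp

-- If no element of l targets slot t, the fold leaves slot t unchanged.
theorem pv_scatter_untouched (vs : List Int) (n : Int) (l : List (Int × Int))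
    (acc : List (Option Int)) (t : Nat)
    (h : ∀ ip ∈ l, 1 ≤ ip.2 ∧ ip.2 ≤ n → (ip.2 - 1).toNat ≠ t) :
    (l.foldl (pvScatterStep vs n) acc)[t]? = acc[t]? := by
  induction l generalizing acc with
  | nil => rfl
  | cons ip rest ih =>
    rw [List.foldl_cons, ih _ (fun q hq => h q (List.mem_cons_of_mem _ hq))]
    unfold pvScatterStep
    split_ifs with hin
    · rw [List.getElem?_set, if_neg (h ip (List.mem_cons_self) hin)]
    · rfl

-- If exactly one element ip0 of l targets slot t, the fold leaves vs[ip0.1] there.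
theorem pv_scatter_unique (vs : List Int) (n : Int) (l : List (Int × Int))
    (acc : List (Option Int)) (t : Nat) (ht : t < acc.length)
    (ip0 : Int × Int) (h0 : ip0 ∈ l) (hin : 1 ≤ ip0.2 ∧ ip0.2 ≤ n)
    (hslot : (ip0.2 - 1).toNat = t)
    (hu : ∀ ip ∈ l, 1 ≤ ip.2 ∧ ip.2 ≤ n → (ip.2 - 1).toNat = t → ip = ip0) :
    (l.foldl (pvScatterStep vs n) acc)[t]? = some (some (vs.getD ip0.1.toNat 0)) := by
  induction l generalizing acc with
  | nil => cases h0
  | cons ip rest ih =>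
    rw [List.foldl_cons]
    by_cases hmem : ip0 ∈ rest
    · exact ih _ (by unfold pvScatterStep; split_ifs <;> simp [ht]) hmem
        (fun q hq => hu q (List.mem_cons_of_mem _ hq))
    · have hip : ip = ip0 := by
        rcases List.mem_cons.mp h0 with h | h
        · exact h.symm
        · exact absurd h hmem
      subst hip
      rw [pv_scatter_untouched vs n rest _ t
          (fun q hq hq2 hq3 => hmem (hu q (List.mem_cons_of_mem _ hq) hq2 hq3 ▸ hq))]
      unfold pvScatterStep
      rw [if_pos hin, hslot, List.getElem?_set, if_pos rfl, if_pos ht]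

-- zip of two equal-length lists as a map over range.
theorem pv_zip_eq_map_range (ps vs : List Int) (hlen : vs.length = ps.length) :
    ps.zip vs = (List.range ps.length).map (fun i => (ps.getD i 0, vs.getD i 0)) := by
  induction ps generalizing vs with
  | nil => simp
  | cons p rest ih =>
    cases vs with
    | nil => simp at hlen
    | cons v vrest =>
      simp only [List.zip_cons_cons, List.length_cons, List.range_succ_eq_map, List.map_cons,
        List.map_map]
      exact congrArg _ (by
        rw [ih vrest (by simpa using hlen)]
        exact List.map_congr_left (fun i _ => rfl))

-- The canonical gather list: slot t holds the value whose priority is t+1.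
theorem pv_sorted_eq_gather (ps vs : List Int) (hlen : vs.length = ps.length)
    (hr : ∀ p ∈ ps, 1 ≤ p ∧ p ≤ (ps.length : Int)) (hnd : ps.Nodup) :
    PySem.List.sorted (ps.zip vs) (fun pv => pv.1) false =
      (List.range ps.length).map
        (fun (t : Nat) => (((t : Int) + 1), vs.getD (ps.idxOf ((t : Int) + 1)) 0)) := by
  apply PySem.List.sorted_eq_of_perm_of_pairwise_lt
  · -- permutation with ps.zip vs
    have hidx : ∀ t ∈ List.range ps.length,
        (fun i => (ps.getD i 0, vs.getD i 0)) (ps.idxOf ((t : Int) + 1)) =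
          (((t : Int) + 1), vs.getD (ps.idxOf ((t : Int) + 1)) 0) := by
      intro t htm
      have hmem := pv_mem_of_perm ps hnd hr t (List.mem_range.mp htm)
      have hlt := List.idxOf_lt_length_of_mem hmem
      simp only [List.getD_eq_getElem?_getD, List.getElem?_eq_getElem hlt, Option.getD_some,
        List.getElem_idxOf hlt]
    rw [← List.map_congr_left hidx, pv_zip_eq_map_range ps vs hlen]
    have hnodup : ((List.range ps.length).map (fun (t : Nat) => ps.idxOf ((t : Int) + 1))).Nodup := by
      apply List.Nodup.map_on _ List.nodup_range
      intro x hx y hy hxy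
      have hxm := pv_mem_of_perm ps hnd hr x (List.mem_range.mp hx)
      have hym := pv_mem_of_perm ps hnd hr y (List.mem_range.mp hy)
      have : ((x : Int) + 1) = ((y : Int) + 1) := by
        rw [← List.getElem_idxOf (List.idxOf_lt_length_of_mem hxm),
            ← List.getElem_idxOf (List.idxOf_lt_length_of_mem hym)]
        simp only [hxy]
      omega
    have hperm : ((List.range ps.length).map (fun (t : Nat) => ps.idxOf ((t : Int) + 1))).Perm
        (List.range ps.length) := by
      refine (List.perm_ext_iff_of_nodup hnodup List.nodup_range).mpr ?_
      intro i
      simp only [List.mem_map, List.mem_range]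
      constructor
      · rintro ⟨t, ht, rfl⟩
        exact List.idxOf_lt_length_of_mem (pv_mem_of_perm ps hnd hr t ht)
      · intro hi
        have hb := hr ps[i] (List.getElem_mem hi)
        refine ⟨(ps[i] - 1).toNat, by omega, ?_⟩
        have hcast : (((ps[i] - 1).toNat : Int) + 1) = ps[i] := by omega
        rw [hcast]
        apply (List.Nodup.getElem_inj_iff hnd).mp
        rw [List.getElem_idxOf (List.idxOf_lt_length_of_mem (List.getElem_mem hi))]
    simpa [List.map_map, Function.comp] using
      List.Perm.map (fun i => (ps.getD i 0, vs.getD i 0)) hperm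
  · -- keys strictly increasing
    exact List.Pairwise.map _ (fun a b h => by simpa using h) List.pairwise_lt_range

-- Per-key equality: A's scatter fold (read through getD 0) = B's sort-based gather.
theorem pv_key_eq (ps vs : List Int) (hlen : vs.length = ps.length)
    (hr : ∀ p ∈ ps, 1 ≤ p ∧ p ≤ (ps.length : Int)) (hnd : ps.Nodup) :
    ((PySem.List.enumerate ps 0).foldl (pvScatterStep vs (ps.length : Int))
        (List.replicate ps.length none)).map (fun o => o.getD 0) =
      (PySem.List.sorted (ps.zip vs) (fun pv => pv.1) false).map (fun pv => pv.2) := by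
  rw [pv_sorted_eq_gather ps vs hlen hr hnd, List.map_map]
  have hscatter :
      (PySem.List.enumerate ps 0).foldl (pvScatterStep vs (ps.length : Int))
          (List.replicate ps.length none) =
        (List.range ps.length).map
          (fun (t : Nat) => some (vs.getD (ps.idxOf ((t : Int) + 1)) 0)) := by
    apply List.ext_getElem?
    intro t
    by_cases ht : t < ps.length
    · have hmem := pv_mem_of_perm ps hnd hr t ht
      have hlt := List.idxOf_lt_length_of_mem hmem
      rw [List.getElem?_map, List.getElem?_range ht, Option.map_some]
      refine pv_scatter_unique vs (ps.length : Int) _ _ t (by simpa using ht)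
        (((ps.idxOf ((t : Int) + 1) : Nat) : Int), (t : Int) + 1) ?_ (by constructor <;> omega)
        (by omega) ?_
      · exact (pv_mem_enumerate ps 0 _).mpr
          ⟨ps.idxOf ((t : Int) + 1), hlt, by rw [List.getElem_idxOf hlt]; simp⟩
      · rintro ip hip hbnd hslot
        obtain ⟨i, hi, rfl⟩ := (pv_mem_enumerate ps 0 ip).mp hip
        simp only at hbnd hslot ⊢
        have hval : ps[i] = (t : Int) + 1 := by omega
        have : ps.idxOf ((t : Int) + 1) = i := by
          apply (List.Nodup.getElem_inj_iff hnd).mp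
          rw [List.getElem_idxOf hlt, hval]
        rw [this]; simp [hval]
    · have h1 : ((List.range ps.length).map
          (fun (t : Nat) => some (vs.getD (ps.idxOf ((t : Int) + 1)) 0)))[t]? = none := by
        apply List.getElem?_eq_none
        simpa using Nat.le_of_not_lt ht
      rw [h1]
      apply List.getElem?_eq_none
      rw [pv_scatter_length]
      simpa using Nat.le_of_not_lt ht
  rw [hscatter, List.map_map]
  exact List.map_congr_left (fun t _ => rfl)

-- ===== VERDICT (by name: the statement is the Claim_ definition above) =====
theorem transform_sequence_spec : Claim_equal_transform_sequence := by
  intro data_dict priorities _ hpre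
  unfold Spec_transform_sequence transform_sequence transform_sequence_alt
  rcases hpre with rfl | ⟨hlen, hr, hnd⟩
  · rfl
  · apply List.map_congr_left
    intro kv hkv
    refine Prod.ext rfl ?_
    exact pv_key_eq priorities kv.2 (by have := hlen kv hkv; exact_mod_cast this) hr hnd
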